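-- pv_equiv track=rewrite | github.com/domamaric/UTR | 2-DFA/MinDKA.py | get_equivalent_states
-- ===== SOURCE A (Python) =====
-- def get_equivalent_states(
--     reachable_states: set[str], distinguishable_table: dict[tuple[str, str], bool]
-- ) -> dict[str, str]:
--     # Initialize each state as its own representative
--     representative_map = {state: state for state in reachable_states}
--     # Find and merge equivalent states
--     # Iterate over all pairs of reachable states
--     sorted_reachable_states = sorted(list(reachable_states))
--     for i, state1 in enumerate(sorted_reachable_states):
--         for j in range(i + 1, len(sorted_reachable_states)):
--             state2 = sorted_reachable_states[j]
--
--             pair = (state1, state2)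
--             if state1 > state2:
--                 pair = (state2, state1)
--
--             # If the pair is not distinguishable, they are equivalent
--             if not distinguishable_table[pair]:
--                 # Find the current representatives of state1 and state2
--                 rep1 = find_representative(state1, representative_map)
--                 rep2 = find_representative(state2, representative_map)
--
--                 if rep1 != rep2:
--                     if rep1 < rep2:
--                         representative_map[rep2] = rep1
--                     else:
--                         representative_map[rep1] = rep2
--
--     # Path compression: Ensure all states directly point to their ultimate representative
--     for state in reachable_states:
--         representative_map[state] = find_representative(state, representative_map)
--
--     return representative_map
--
-- def find_representative(state: str, representative_map: dict[str, str]) -> str: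
--     if representative_map[state] == state:
--         return state
--     representative_map[state] = find_representative(
--         representative_map[state], representative_map
--     )
--     return representative_map[state]
-- ===== SOURCE B (Python) =====
-- def get_equivalent_states(
--     reachable_states: set[str], distinguishable_table: dict[tuple[str, str], bool]
-- ) -> dict[str, str]:
--     # Flat label map instead of a union-find forest: label[s] is always the
--     # current class minimum; merging relabels the whole larger-labelled class.
--     states = sorted(reachable_states)
--     label = {s: s for s in states}
--     for i, s1 in enumerate(states):
--         for s2 in states[i + 1:]:
--             if not distinguishable_table[(s1, s2)]:
--                 l1 = label[s1]
--                 l2 = label[s2]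
--                 if l1 != l2:
--                     lo, hi = (l1, l2) if l1 < l2 else (l2, l1)
--                     for t in states:
--                         if label[t] == hi:
--                             label[t] = lo
--     return {s: label[s] for s in reachable_states}
-- ===== Notes on version B (the rewrite author's own statement) =====
-- stated objective: alternative
-- what changed: A's union-find forest (parent map with recursive find_representative, path compression and a final compression pass) is replaced by a flat state-to-class-minimum label map: each non-distinguishable pair whose labels differ relabels the whole larger-labelled class in one scan, so there are no parent chains, no recursion and no compression pass.
import Mathlib
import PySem

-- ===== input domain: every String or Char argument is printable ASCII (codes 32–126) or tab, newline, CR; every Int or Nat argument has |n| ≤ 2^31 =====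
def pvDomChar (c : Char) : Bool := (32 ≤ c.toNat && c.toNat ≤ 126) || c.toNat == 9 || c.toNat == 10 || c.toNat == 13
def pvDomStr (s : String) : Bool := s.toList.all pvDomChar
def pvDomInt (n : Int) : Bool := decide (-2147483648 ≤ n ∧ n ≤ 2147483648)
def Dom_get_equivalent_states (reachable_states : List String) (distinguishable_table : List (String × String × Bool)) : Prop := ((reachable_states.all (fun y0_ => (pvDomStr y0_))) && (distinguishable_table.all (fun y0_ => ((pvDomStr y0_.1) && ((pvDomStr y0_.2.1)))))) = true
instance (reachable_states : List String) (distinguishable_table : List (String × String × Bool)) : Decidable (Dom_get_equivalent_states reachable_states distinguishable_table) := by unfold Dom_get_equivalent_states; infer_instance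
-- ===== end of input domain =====

-- B replaces A's union-find forest (recursive find + path compression) by a flat
-- state→class-minimum label map whose merges relabel the larger-labelled class in one scan
-- (objective: alternative; same O(n²) cost).

-- ===== PORT A =====
-- lookup in the input dict `distinguishable_table` (first match = assoc-list convention);
-- `none` is exactly Python's KeyError, excluded by Pre_.
def pvTableGet? (t : List (String × String × Bool)) (a b : String) : Option Bool :=
  (t.find? (fun e => e.1 == a && e.2.1 == b)).map (fun e => e.2.2)

-- find_representative, literally; `fuel` only makes the Python recursion structural
-- (on inputs admitted by Pre_ the fuel branch is never reached), the map read
-- `representative_map[state]` is `getD state state` (the key is always present when called).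
def pvFind : Nat → PySem.Dict String String → String → String × PySem.Dict String String
  | 0, m, state => (state, m)
  | fuel+1, m, state =>
    let p := m.getD state state
    if p = state then (state, m)
    else
      let res := pvFind fuel m p
      (res.1, res.2.insert state res.1)

-- body of A's inner `for j in range(i+1, len(sorted_reachable_states))` loop
def pvBodyA (table : List (String × String × Bool)) (fuel : Nat) (state1 : String)
    (m : PySem.Dict String String) (state2 : String) : PySem.Dict String String :=
  let pair := if state1 > state2 then (state2, state1) else (state1, state2)
  match pvTableGet? table pair.1 pair.2 with
  | none => m          -- Python raises KeyError here; such inputs are outside Pre_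
  | some d =>
    if d then m
    else
      let r1m := pvFind fuel m state1
      let r2m := pvFind fuel r1m.2 state2
      if r1m.1 ≠ r2m.1 then
        if r1m.1 < r2m.1 then r2m.2.insert r2m.1 r1m.1
        else r2m.2.insert r1m.1 r2m.1
      else r2m.2

def get_equivalent_states (reachable_states : List String) (distinguishable_table : List (String × String × Bool)) : List (String × String) :=
  let m0 : PySem.Dict String String := reachable_states.foldl (fun d s => d.insert s s) PySem.Dict.empty
  let srt := PySem.List.sorted reachable_states (fun x => x) false
  let fuel := srt.length + 1
  let m1 := (PySem.List.enumerate srt 0).foldl (fun m p =>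
      (PySem.List.pyRange (p.1 + 1) (PySem.List.len srt) 1).foldl
        (fun m j => pvBodyA distinguishable_table fuel p.2 m (PySem.List.pyGetD srt j p.2)) m) m0
  let m2 := reachable_states.foldl (fun m s =>
      let rm := pvFind fuel m s
      rm.2.insert s rm.1) m1
  m2.items

-- ===== PORT B =====
-- body of B's inner `for s2 in states[i+1:]` loop
def pvBodyB (table : List (String × String × Bool)) (states : List String) (s1 : String)
    (lab : PySem.Dict String String) (s2 : String) : PySem.Dict String String :=
  match pvTableGet? table s1 s2 with
  | none => lab        -- Python raises KeyError here; such inputs are outside Pre_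
  | some d =>
    if d then lab
    else
      let l1 := lab.getD s1 s1
      let l2 := lab.getD s2 s2
      if l1 ≠ l2 then
        let lo := if l1 < l2 then l1 else l2
        let hi := if l1 < l2 then l2 else l1
        states.foldl (fun lab t => if lab.getD t t = hi then lab.insert t lo else lab) lab
      else lab

def get_equivalent_states_alt (reachable_states : List String) (distinguishable_table : List (String × String × Bool)) : List (String × String) :=
  let states := PySem.List.sorted reachable_states (fun x => x) false
  let lab0 : PySem.Dict String String := states.foldl (fun d s => d.insert s s) PySem.Dict.empty
  let lab := (PySem.List.enumerate states 0).foldl (fun lab p =>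
      (PySem.List.slice states (some (p.1 + 1)) none).foldl
        (fun lab s2 => pvBodyB distinguishable_table states p.2 lab s2) lab) lab0
  (reachable_states.foldl (fun d s => d.insert s (lab.getD s s)) PySem.Dict.empty).items

-- ===== PRECONDITION & SPEC =====
-- Pre_ excludes exactly the inputs on which Python A raises KeyError: some pair of distinct
-- reachable states is missing from distinguishable_table (first-match assoc-list lookup;
-- toList '<' is Python's code-point string comparison). reachable_states is a Python set,
-- so its List rendering holds distinct elements (Nodup).
def Pre_get_equivalent_states (reachable_states : List String) (distinguishable_table : List (String × String × Bool)) : Prop :=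
  reachable_states.Nodup ∧
  ∀ s1 ∈ reachable_states, ∀ s2 ∈ reachable_states, s1.toList < s2.toList →
    (distinguishable_table.find? (fun e => e.1 == s1 && e.2.1 == s2)).isSome = true
instance (reachable_states : List String) (distinguishable_table : List (String × String × Bool)) : Decidable (Pre_get_equivalent_states reachable_states distinguishable_table) := by unfold Pre_get_equivalent_states; infer_instance

def pvWitness_get_equivalent_states : List String × (List (String × String × Bool)) :=
  (["b", "a", "c"], [("a", "b", false), ("a", "c", true), ("b", "c", true)])

def Spec_get_equivalent_states (reachable_states : List String) (distinguishable_table : List (String × String × Bool)) (out : List (String × String)) : Prop := out = get_equivalent_states_alt reachable_states distinguishable_table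
instance (reachable_states : List String) (distinguishable_table : List (String × String × Bool)) (out : List (String × String)) : Decidable (Spec_get_equivalent_states reachable_states distinguishable_table out) := by unfold Spec_get_equivalent_states; infer_instance

-- ===== CLAIM (what is proved, stated in full; the proofs are below) =====
def Claim_equal_get_equivalent_states : Prop := ∀ (reachable_states : List String) (distinguishable_table : List (String × String × Bool)), Dom_get_equivalent_states reachable_states distinguishable_table → Pre_get_equivalent_states reachable_states distinguishable_table → Spec_get_equivalent_states reachable_states distinguishable_table (get_equivalent_states reachable_states distinguishable_table)

-- ===== LEMMAS AND PROOFS =====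

-- the simulation invariant: `m` is A's parent forest, `lab` is B's label map;
-- every parent is a smaller member of the same class, roots are exactly class minima.
def pvInv (rs S : List String) (m lab : PySem.Dict String String) : Prop :=
  m.keys = PySem.Set.ofList rs ∧
  (∀ s ∈ S, m.getD s s ∈ S ∧ m.getD s s ≤ s) ∧
  (∀ s ∈ S, lab.getD s s ∈ S ∧ lab.getD s s ≤ s ∧
      lab.getD (lab.getD s s) (lab.getD s s) = lab.getD s s) ∧
  (∀ s ∈ S, lab.getD (m.getD s s) (m.getD s s) = lab.getD s s) ∧
  (∀ s ∈ S, m.getD s s = s ↔ lab.getD s s = s)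

lemma pvGetD_foldl_ins (g : String → String) :
    ∀ (l : List String) (d : PySem.Dict String String) (t : String),
      (l.foldl (fun d x => d.insert x (g x)) d).getD t t
        = if t ∈ l then g t else d.getD t t := by
  intro l
  induction l with
  | nil => simp
  | cons x l ih =>
    intro d t
    simp only [List.foldl_cons, ih, PySem.Dict.getD_insert, List.mem_cons]
    by_cases h1 : t ∈ l <;> by_cases h2 : t = x <;> simp [h1, h2]

lemma pvCountP_lt {l : List String} {p s : String} (hp : p ∈ l) (hps : p < s) :
    l.countP (fun x => decide (x < p)) < l.countP (fun x => decide (x < s)) := by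
  obtain ⟨l1, l2, rfl⟩ := List.append_of_mem hp
  have e1 : (fun x => decide (x < p)) p = false := by simp
  have e2 : (fun x => decide (x < s)) p = true := by simpa using hps
  simp only [List.countP_append, List.countP_cons, e1, e2, Bool.false_eq_true, if_true, if_false]
  have h1 : l1.countP (fun x => decide (x < p)) ≤ l1.countP (fun x => decide (x < s)) :=
    List.countP_mono_left (fun x _ hx => by
      simp only [decide_eq_true_eq] at hx ⊢; exact lt_trans hx hps)
  have h2 : l2.countP (fun x => decide (x < p)) ≤ l2.countP (fun x => decide (x < s)) :=
    List.countP_mono_left (fun x _ hx => by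
      simp only [decide_eq_true_eq] at hx ⊢; exact lt_trans hx hps)
  omega

lemma pvRelabel_getD (hi lo : String) (hne : lo ≠ hi) :
    ∀ (P : List String) (lab : PySem.Dict String String) (t : String),
      (P.foldl (fun d x => if d.getD x x = hi then d.insert x lo else d) lab).getD t t
        = if t ∈ P ∧ lab.getD t t = hi then lo else lab.getD t t := by
  intro P
  induction P with
  | nil => simp
  | cons x P ih =>
    intro lab t
    simp only [List.foldl_cons, List.mem_cons]
    by_cases hx : lab.getD x x = hi
    · simp only [hx, if_true, ih, PySem.Dict.getD_insert]
      by_cases h2 : t = x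
      · subst h2; simp [hne, hx]
      · simp only [h2, if_false]
        by_cases h1 : t ∈ P <;> by_cases h3 : lab.getD t t = hi <;> simp [h1, h3]
    · simp only [hx, if_false, ih]
      by_cases h2 : t = x
      · subst h2; simp [hx]
      · by_cases h1 : t ∈ P <;> by_cases h3 : lab.getD t t = hi <;> simp [h1, h2, h3]

lemma pvFind_spec (rs S : List String) (hmem : ∀ x ∈ S, x ∈ rs) :
    ∀ (fuel : Nat) (m lab : PySem.Dict String String) (s : String),
      pvInv rs S m lab → s ∈ S → S.countP (fun x => decide (x < s)) < fuel →
      (pvFind fuel m s).1 = lab.getD s s ∧ pvInv rs S (pvFind fuel m s).2 lab ∧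
      (∀ x : String, (pvFind fuel m s).2.getD x x = m.getD x x ∨
          (pvFind fuel m s).2.getD x x = lab.getD x x) := by
  intro fuel
  induction fuel with
  | zero => intro m lab s _ _ h; omega
  | succ fuel ih =>
    intro m lab s hInv hs hfuel
    obtain ⟨hK, hM, hL, hML, hRt⟩ := hInv
    by_cases hp : m.getD s s = s
    · -- root: result (s, m); lab.getD s s = s by hRt
      have hlab : lab.getD s s = s := (hRt s hs).mp hp
      simp only [pvFind, hp]
      exact ⟨hlab.symm, ⟨hK, hM, hL, hML, hRt⟩, fun x => Or.inl rfl⟩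
    · have hpS : m.getD s s ∈ S := (hM s hs).1
      have hple : m.getD s s ≤ s := (hM s hs).2
      have hplt : m.getD s s < s := lt_of_le_of_ne hple hp
      have hmu : S.countP (fun x => decide (x < m.getD s s)) < fuel := by
        have := pvCountP_lt hpS hplt
        omega
      obtain ⟨ih1, ih2, ih3⟩ := ih m lab (m.getD s s) ⟨hK, hM, hL, hML, hRt⟩ hpS hmu
      obtain ⟨hK', hM', hL', hML', hRt'⟩ := ih2
      have hval : (pvFind fuel m (m.getD s s)).1 = lab.getD s s := by rw [ih1, hML s hs]
      rw [show pvFind (fuel+1) m s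
          = ((pvFind fuel m (m.getD s s)).1,
             (pvFind fuel m (m.getD s s)).2.insert s (pvFind fuel m (m.getD s s)).1) from by
        simp only [pvFind, if_neg hp]]
      have hlabS : lab.getD s s ∈ S ∧ lab.getD s s ≤ s ∧
          lab.getD (lab.getD s s) (lab.getD s s) = lab.getD s s := hL s hs
      have hins : ∀ t : String, ((pvFind fuel m (m.getD s s)).2.insert s (pvFind fuel m (m.getD s s)).1).getD t t
          = if t = s then (pvFind fuel m (m.getD s s)).1 else (pvFind fuel m (m.getD s s)).2.getD t t := by
        intro t; simp [PySem.Dict.getD_insert]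
      refine ⟨hval, ⟨?_, ?_, hL', ?_, ?_⟩, ?_⟩
      · -- keys
        rw [PySem.Dict.keys_insert_of_contains, hK']
        rw [PySem.Dict.contains_iff_mem_keys, hK']
        have := hmem s hs
        simpa [PySem.Set.mem_ofList] using this
      · intro t htS
        rw [hins t]
        by_cases hts : t = s
        · subst hts
          rw [if_pos rfl, hval]
          exact ⟨hlabS.1, hlabS.2.1⟩
        · rw [if_neg hts]; exact hM' t htS
      · intro t htS
        rw [hins t]
        by_cases hts : t = s
        · subst hts
          rw [if_pos rfl, hval]
          exact hlabS.2.2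
        · rw [if_neg hts]; exact hML' t htS
      · intro t htS
        rw [hins t]
        by_cases hts : t = s
        · subst hts
          rw [if_pos rfl, hval]
        · rw [if_neg hts]; exact hRt' t htS
      · intro x
        rw [hins x]
        by_cases hxs : x = s
        · subst hxs; rw [if_pos rfl, hval]; exact Or.inr rfl
        · rw [if_neg hxs]; exact ih3 x

lemma pvUnion_inv (rs S : List String) (m lab : PySem.Dict String String)
    (hmem : ∀ x ∈ S, x ∈ rs)
    (hInv : pvInv rs S m lab) (lo hi : String)
    (hloS : lo ∈ S) (hhiS : hi ∈ S) (hlt : lo < hi)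
    (hlo : lab.getD lo lo = lo) (hhi : lab.getD hi hi = hi) :
    pvInv rs S (m.insert hi lo)
      (S.foldl (fun d x => if d.getD x x = hi then d.insert x lo else d) lab) := by
  obtain ⟨hK, hM, hL, hML, hRt⟩ := hInv
  have hne : lo ≠ hi := ne_of_lt hlt
  have hchar := pvRelabel_getD hi lo hne S lab
  have hmins : ∀ t : String, (m.insert hi lo).getD t t = if t = hi then lo else m.getD t t := by
    intro t; simp [PySem.Dict.getD_insert]
  refine ⟨?_, ?_, ?_, ?_, ?_⟩
  · rw [PySem.Dict.keys_insert_of_contains, hK]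
    rw [PySem.Dict.contains_iff_mem_keys, hK]
    simpa [PySem.Set.mem_ofList] using hmem hi hhiS
  · intro t htS
    rw [hmins t]
    by_cases hth : t = hi
    · subst hth; rw [if_pos rfl]; exact ⟨hloS, le_of_lt hlt⟩
    · rw [if_neg hth]; exact hM t htS
  · intro t htS
    rw [hchar t]
    by_cases hc : t ∈ S ∧ lab.getD t t = hi
    · rw [if_pos hc]
      have hlo' : lab.getD lo lo ≠ hi := by rw [hlo]; exact hne
      refine ⟨hloS, ?_, ?_⟩
      · calc lo ≤ hi := le_of_lt hlt
          _ = lab.getD t t := hc.2.symm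
          _ ≤ t := (hL t htS).2.1
      · rw [hchar lo, if_neg (by intro h; exact hlo' h.2), hlo]
    · rw [if_neg hc]
      have hv := hL t htS
      have hvhi : lab.getD t t ≠ hi := by
        intro h; exact hc ⟨htS, h⟩
      refine ⟨hv.1, hv.2.1, ?_⟩
      rw [hchar (lab.getD t t), if_neg ?_, hv.2.2]
      intro h
      rw [hv.2.2] at h
      exact hvhi h.2
  · intro t htS
    rw [hmins t, hchar t]
    by_cases hth : t = hi
    · subst hth
      rw [if_pos rfl, if_pos ⟨htS, hhi⟩]
      rw [hchar lo, if_neg (by rw [hlo]; intro h; exact hne h.2), hlo]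
    · rw [if_neg hth]
      have hmt := hM t htS
      rw [hchar (m.getD t t)]
      rw [hML t htS]
      by_cases hc : lab.getD t t = hi
      · rw [if_pos ⟨hmt.1, hc⟩, if_pos ⟨htS, hc⟩]
      · rw [if_neg (by intro h; exact hc h.2), if_neg (by intro h; exact hc h.2)]
  · intro t htS
    rw [hmins t, hchar t]
    by_cases hth : t = hi
    · subst hth
      rw [if_pos rfl, if_pos ⟨htS, hhi⟩]
    · rw [if_neg hth]
      by_cases hc : lab.getD t t = hi
      · rw [if_pos ⟨htS, hc⟩]
        constructor
        · intro h
          have h2 := (hRt t htS).mp h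
          exact ((hth (h2.symm.trans hc)).elim : m.getD t t = t → False) h |>.elim
        · intro h
          rw [← h] at hc
          rw [hlo] at hc
          exact (hne hc).elim
      · rw [if_neg (by intro h; exact hc h.2)]
        exact hRt t htS

lemma pvStep_spec (rs S : List String) (table : List (String × String × Bool))
    (hmem : ∀ x ∈ S, x ∈ rs)
    (m lab : PySem.Dict String String) (s1 s2 : String)
    (hInv : pvInv rs S m lab) (hs1 : s1 ∈ S) (hs2 : s2 ∈ S) (hle : s1 ≤ s2) :
    pvInv rs S (pvBodyA table (S.length + 1) s1 m s2) (pvBodyB table S s1 lab s2) := by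
  have hng : ¬ s1 > s2 := not_lt.mpr hle
  unfold pvBodyA pvBodyB
  rw [if_neg hng]
  cases hlk : pvTableGet? table s1 s2 with
  | none => simp only [hlk]; exact hInv
  | some d =>
    simp only [hlk]
    cases d with
    | true => exact hInv
    | false =>
      simp only [Bool.false_eq_true, if_false, ne_eq, ite_not]
      have hf1 := pvFind_spec rs S hmem (S.length + 1) m lab s1 hInv hs1
        (Nat.lt_succ_of_le List.countP_le_length)
      obtain ⟨hr1, hInv1, _⟩ := hf1
      have hf2 := pvFind_spec rs S hmem (S.length + 1) (pvFind (S.length + 1) m s1).2 lab s2 hInv1 hs2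
        (Nat.lt_succ_of_le List.countP_le_length)
      obtain ⟨hr2, hInv2, _⟩ := hf2
      rw [hr1, hr2]
      by_cases heq : lab.getD s1 s1 = lab.getD s2 s2
      · simp only [if_pos heq]; exact hInv2
      · simp only [if_neg heq]
        by_cases hlt : lab.getD s1 s1 < lab.getD s2 s2
        · simp only [if_pos hlt]
          exact pvUnion_inv rs S _ lab hmem hInv2 (lab.getD s1 s1) (lab.getD s2 s2)
            (hInv2.2.2.1 s1 hs1).1 (hInv2.2.2.1 s2 hs2).1 hlt
            (hInv2.2.2.1 s1 hs1).2.2 (hInv2.2.2.1 s2 hs2).2.2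
        · simp only [if_neg hlt]
          have hlt' : lab.getD s2 s2 < lab.getD s1 s1 :=
            lt_of_le_of_ne (not_lt.mp hlt) (Ne.symm heq)
          exact pvUnion_inv rs S _ lab hmem hInv2 (lab.getD s2 s2) (lab.getD s1 s1)
            (hInv2.2.2.1 s2 hs2).1 (hInv2.2.2.1 s1 hs1).1 hlt'
            (hInv2.2.2.1 s2 hs2).2.2 (hInv2.2.2.1 s1 hs1).2.2

lemma pvInsertLab_inv (rs S : List String) (hmem : ∀ x ∈ S, x ∈ rs)
    (m lab : PySem.Dict String String) (hInv : pvInv rs S m lab)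
    (x : String) (hx : x ∈ S) :
    pvInv rs S (m.insert x (lab.getD x x)) lab := by
  obtain ⟨hK, hM, hL, hML, hRt⟩ := hInv
  have hins : ∀ t : String, (m.insert x (lab.getD x x)).getD t t
      = if t = x then lab.getD x x else m.getD t t := by
    intro t; simp [PySem.Dict.getD_insert]
  have hLx := hL x hx
  refine ⟨?_, ?_, hL, ?_, ?_⟩
  · rw [PySem.Dict.keys_insert_of_contains, hK]
    rw [PySem.Dict.contains_iff_mem_keys, hK]
    simpa [PySem.Set.mem_ofList] using hmem x hx
  · intro t htS
    rw [hins t]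
    by_cases htx : t = x
    · subst htx; rw [if_pos rfl]; exact ⟨hLx.1, hLx.2.1⟩
    · rw [if_neg htx]; exact hM t htS
  · intro t htS
    rw [hins t]
    by_cases htx : t = x
    · subst htx; rw [if_pos rfl]; exact hLx.2.2
    · rw [if_neg htx]; exact hML t htS
  · intro t htS
    rw [hins t]
    by_cases htx : t = x
    · subst htx; rw [if_pos rfl]
    · rw [if_neg htx]; exact hRt t htS

lemma pvFinal_spec (rs S : List String) (hmem : ∀ x ∈ S, x ∈ rs) (lab : PySem.Dict String String) :
    ∀ (L : List String) (m : PySem.Dict String String),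
      pvInv rs S m lab → (∀ s ∈ L, s ∈ S) →
      pvInv rs S (L.foldl (fun m s =>
          let rm := pvFind (S.length + 1) m s
          rm.2.insert s rm.1) m) lab ∧
      (∀ x : String, (L.foldl (fun m s =>
          let rm := pvFind (S.length + 1) m s
          rm.2.insert s rm.1) m).getD x x = m.getD x x ∨
        (L.foldl (fun m s =>
          let rm := pvFind (S.length + 1) m s
          rm.2.insert s rm.1) m).getD x x = lab.getD x x) ∧
      (∀ s ∈ L, (L.foldl (fun m s =>
          let rm := pvFind (S.length + 1) m s
          rm.2.insert s rm.1) m).getD s s = lab.getD s s) := by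
  intro L
  induction L with
  | nil => intro m hInv _; exact ⟨hInv, fun x => Or.inl rfl, by simp⟩
  | cons x L ih =>
    intro m hInv hL
    have hxS : x ∈ S := hL x (List.mem_cons_self)
    obtain ⟨hr, hInvF, hOr⟩ := pvFind_spec rs S hmem (S.length + 1) m lab x hInv hxS
      (Nat.lt_succ_of_le List.countP_le_length)
    set m₁ := (pvFind (S.length + 1) m x).2.insert x (pvFind (S.length + 1) m x).1 with hm₁
    have hm₁' : m₁ = (pvFind (S.length + 1) m x).2.insert x (lab.getD x x) := by rw [hm₁, hr]
    have hInv₁ : pvInv rs S m₁ lab := by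
      rw [hm₁']; exact pvInsertLab_inv rs S hmem _ lab hInvF x hxS
    have hOr₁ : ∀ t : String, m₁.getD t t = m.getD t t ∨ m₁.getD t t = lab.getD t t := by
      intro t
      rw [hm₁']
      have : ((pvFind (S.length + 1) m x).2.insert x (lab.getD x x)).getD t t
          = if t = x then lab.getD x x else (pvFind (S.length + 1) m x).2.getD t t := by
        simp [PySem.Dict.getD_insert]
      rw [this]
      by_cases htx : t = x
      · subst htx; rw [if_pos rfl]; exact Or.inr rfl
      · rw [if_neg htx]; exact hOr t
    have hx₁ : m₁.getD x x = lab.getD x x := by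
      rw [hm₁']; simp
    obtain ⟨ihInv, ihOr, ihEq⟩ := ih m₁ hInv₁ (fun s hs => hL s (List.mem_cons_of_mem _ hs))
    simp only [List.foldl_cons]
    refine ⟨ihInv, ?_, ?_⟩
    · intro t
      rcases ihOr t with h | h
      · rw [h]; exact hOr₁ t
      · exact Or.inr h
    · intro s hs
      rcases List.mem_cons.mp hs with rfl | hsL
      · rcases ihOr s with h | h
        · rw [h, hx₁]
        · exact h
      · exact ihEq s hsL

lemma pvInner_spec (rs S : List String) (table : List (String × String × Bool))
    (hmem : ∀ x ∈ S, x ∈ rs) (s1 : String) :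
    ∀ (T : List String) (m lab : PySem.Dict String String),
      pvInv rs S m lab → s1 ∈ S → (∀ s2 ∈ T, s2 ∈ S ∧ s1 ≤ s2) →
      pvInv rs S (T.foldl (pvBodyA table (S.length + 1) s1) m)
        (T.foldl (pvBodyB table S s1) lab) := by
  intro T
  induction T with
  | nil => intro m lab hInv _ _; exact hInv
  | cons x T ih =>
    intro m lab hInv hs1 hT
    simp only [List.foldl_cons]
    exact ih _ _ (pvStep_spec rs S table hmem m lab s1 x hInv hs1
        (hT x List.mem_cons_self).1 (hT x List.mem_cons_self).2) hs1
      (fun s2 hs2 => hT s2 (List.mem_cons_of_mem _ hs2))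

lemma pvPairwise_drop (S : List String) (hp : S.Pairwise (· ≤ ·)) (k : Nat) (hk : k < S.length) :
    ∀ s2 ∈ S.drop (k+1), S[k] ≤ s2 := by
  intro s2 hs2
  obtain ⟨i, hi, rfl⟩ := List.mem_iff_getElem.mp hs2
  have hi' : k + 1 + i < S.length := by
    have h := hi; simp [List.length_drop] at h; omega
  rw [List.getElem_drop]
  exact List.pairwise_iff_getElem.mp hp k (k+1+i) hk hi' (by omega)

lemma pvOuter_spec (rs S : List String) (table : List (String × String × Bool))
    (hmem : ∀ x ∈ S, x ∈ rs) (hpair : S.Pairwise (· ≤ ·)) :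
    ∀ (E : List (Int × String)) (m lab : PySem.Dict String String),
      pvInv rs S m lab →
      (∀ p ∈ E, ∃ k : Nat, p.1 = (k : Int) ∧ ∃ h : k < S.length, p.2 = S[k]) →
      pvInv rs S
        (E.foldl (fun m p => ((S.drop (p.1 + 1).toNat).foldl (pvBodyA table (S.length + 1) p.2) m)) m)
        (E.foldl (fun lab p => ((S.drop (p.1 + 1).toNat).foldl (pvBodyB table S p.2) lab)) lab) := by
  intro E
  induction E with
  | nil => intro m lab hInv _; exact hInv
  | cons p E ih =>
    intro m lab hInv hE
    obtain ⟨k, hk1, hk2, hk3⟩ := hE p List.mem_cons_self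
    simp only [List.foldl_cons]
    have hdrop : (p.1 + 1).toNat = k + 1 := by rw [hk1]; omega
    have hstep : pvInv rs S ((S.drop (p.1 + 1).toNat).foldl (pvBodyA table (S.length + 1) p.2) m)
        ((S.drop (p.1 + 1).toNat).foldl (pvBodyB table S p.2) lab) := by
      rw [hdrop, hk3]
      exact pvInner_spec rs S table hmem S[k] (S.drop (k+1)) m lab hInv
        (List.getElem_mem hk2)
        (fun s2 hs2 => ⟨List.mem_of_mem_drop hs2, pvPairwise_drop S hpair k hk2 s2 hs2⟩)
    exact ih _ _ hstep (fun q hq => hE q (List.mem_cons_of_mem _ hq))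

lemma pvGetD_default_eq (d : PySem.Dict String String) (k : String) (h : k ∈ d.keys) (d1 d2 : String) :
    d.getD k d1 = d.getD k d2 := by
  have hc : d.contains k = true := (PySem.Dict.contains_iff_mem_keys d k).mpr h
  rw [PySem.Dict.contains_eq_isSome_get?] at hc
  obtain ⟨v, hv⟩ := Option.isSome_iff_exists.mp hc
  simp [PySem.Dict.getD_eq_get?_getD, hv]

theorem main_eq (reachable_states : List String) (distinguishable_table : List (String × String × Bool)) :
    get_equivalent_states reachable_states distinguishable_table
      = get_equivalent_states_alt reachable_states distinguishable_table := by
  unfold get_equivalent_states get_equivalent_states_alt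
  simp only []
  set S := PySem.List.sorted reachable_states (fun x => x) false with hS
  have hperm : S.Perm reachable_states := PySem.List.sorted_perm reachable_states (fun x => x) false
  have hmem : ∀ x ∈ S, x ∈ reachable_states := fun x hx => hperm.subset hx
  have hmem' : ∀ x ∈ reachable_states, x ∈ S := fun x hx => hperm.symm.subset hx
  have hpair : S.Pairwise (· ≤ ·) := PySem.List.sorted_pairwise reachable_states _
  -- initial maps
  set m0 : PySem.Dict String String := reachable_states.foldl (fun d s => d.insert s s) PySem.Dict.empty with hm0
  set lab0 : PySem.Dict String String := S.foldl (fun d s => d.insert s s) PySem.Dict.empty with hlab0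
  have hm0get : ∀ t : String, m0.getD t t = t := by
    intro t; rw [hm0, pvGetD_foldl_ins (fun x => x)]; split <;> simp [PySem.Dict.getD_empty]
  have hlab0get : ∀ t : String, lab0.getD t t = t := by
    intro t; rw [hlab0, pvGetD_foldl_ins (fun x => x)]; split <;> simp [PySem.Dict.getD_empty]
  have hm0keys : m0.keys = PySem.Set.ofList reachable_states := by
    rw [hm0, PySem.Dict.keys_foldl_insert]
    simp [PySem.Set.update_nil_left]
  have hInv0 : pvInv reachable_states S m0 lab0 := by
    refine ⟨hm0keys, ?_, ?_, ?_, ?_⟩ <;> intro s hs <;>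
      simp only [hm0get, hlab0get] <;> simp [hs]
  -- rewrite A's inner loop (index loop) into a fold over the dropped suffix
  have hbridgeA : ∀ (m : PySem.Dict String String),
      (PySem.List.enumerate S 0).foldl (fun m p =>
        (PySem.List.pyRange (p.1 + 1) (PySem.List.len S) 1).foldl
          (fun m j => pvBodyA distinguishable_table (S.length + 1) p.2 m (PySem.List.pyGetD S j p.2)) m) m
      = (PySem.List.enumerate S 0).foldl (fun m p =>
          ((S.drop (p.1 + 1).toNat).foldl (pvBodyA distinguishable_table (S.length + 1) p.2) m)) m := by
    intro m
    apply PySem.List.foldl_congr_mem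
    intro acc p hp
    obtain ⟨k, hk, hpk⟩ := (PySem.List.mem_enumerate_iff S 0 p).mp hp
    have h1 : (0:Int) ≤ p.1 + 1 := by rw [hpk]; simp; omega
    exact PySem.List.foldl_pyRange_pyGetD S p.2 _ acc h1
  have hbridgeB : ∀ (lab : PySem.Dict String String),
      (PySem.List.enumerate S 0).foldl (fun lab p =>
        (PySem.List.slice S (some (p.1 + 1)) none).foldl
          (fun lab s2 => pvBodyB distinguishable_table S p.2 lab s2) lab) lab
      = (PySem.List.enumerate S 0).foldl (fun lab p =>
          ((S.drop (p.1 + 1).toNat).foldl (pvBodyB distinguishable_table S p.2) lab)) lab := by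
    intro lab
    apply PySem.List.foldl_congr_mem
    intro acc p hp
    obtain ⟨k, hk, hpk⟩ := (PySem.List.mem_enumerate_iff S 0 p).mp hp
    have h1 : (0:Int) ≤ p.1 + 1 := by rw [hpk]; simp; omega
    rw [PySem.List.slice_from S h1]
  rw [hbridgeA, hbridgeB]
  have hEnum : ∀ p ∈ PySem.List.enumerate S 0, ∃ k : Nat, p.1 = (k : Int) ∧ ∃ h : k < S.length, p.2 = S[k] := by
    intro p hp
    obtain ⟨k, hk, hpk⟩ := (PySem.List.mem_enumerate_iff S 0 p).mp hp
    exact ⟨k, by rw [hpk]; simp, hk, by rw [hpk]⟩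
  have hInv1 := pvOuter_spec reachable_states S distinguishable_table hmem hpair
    (PySem.List.enumerate S 0) m0 lab0 hInv0 hEnum
  set m1 := (PySem.List.enumerate S 0).foldl (fun m p =>
      ((S.drop (p.1 + 1).toNat).foldl (pvBodyA distinguishable_table (S.length + 1) p.2) m)) m0 with hm1
  set labF := (PySem.List.enumerate S 0).foldl (fun lab p =>
      ((S.drop (p.1 + 1).toNat).foldl (pvBodyB distinguishable_table S p.2) lab)) lab0 with hlabF
  obtain ⟨hInv2, _, hEq2⟩ := pvFinal_spec reachable_states S hmem labF reachable_states m1 hInv1 hmem'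
  set m2 := reachable_states.foldl (fun m s =>
      let rm := pvFind (S.length + 1) m s
      rm.2.insert s rm.1) m1 with hm2
  set out := reachable_states.foldl (fun d s => d.insert s (labF.getD s s)) PySem.Dict.empty with hout
  have houtkeys : out.keys = PySem.Set.ofList reachable_states := by
    rw [hout, PySem.Dict.keys_foldl_insert]
    simp [PySem.Set.update_nil_left]
  have hm2keys : m2.keys = PySem.Set.ofList reachable_states := hInv2.1
  have hnd2 : m2.keys.Nodup := by rw [hm2keys]; exact PySem.Set.nodup_ofList reachable_states
  have hndo : out.keys.Nodup := by rw [houtkeys]; exact PySem.Set.nodup_ofList reachable_states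
  rw [PySem.Dict.items_eq_map_keys m2 hnd2 "", PySem.Dict.items_eq_map_keys out hndo "",
    hm2keys, houtkeys]
  refine List.map_congr_left (fun k hk => ?_)
  have hkrs : k ∈ reachable_states := by
    rw [PySem.Set.mem_ofList] at hk; exact hk
  have h1 : m2.getD k "" = m2.getD k k :=
    pvGetD_default_eq m2 k (by rw [hm2keys]; exact hk) "" k
  have h2 : out.getD k "" = out.getD k k :=
    pvGetD_default_eq out k (by rw [houtkeys]; exact hk) "" k
  rw [h1, h2]
  have h3 : out.getD k k = labF.getD k k := by
    rw [hout, pvGetD_foldl_ins (fun s => labF.getD s s), if_pos hkrs]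
  rw [h3, hEq2 k hkrs]

-- ===== VERDICT (by name: the statement is the Claim_ definition above) =====
theorem get_equivalent_states_spec : Claim_equal_get_equivalent_states := by
  intro reachable_states distinguishable_table _ _
  exact main_eq reachable_states distinguishable_table
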